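-- pv_equiv track=rewrite | github.com/deepakprajapati07/Bioinformatics | custom_msa.py | propagate_gaps_to_msa
-- ===== SOURCE A (Python) =====
-- def propagate_gaps_to_msa(msa, aligned_seq, seq_index):
--     for i, char in enumerate(aligned_seq):
--         if char == "-":  # Gap detected in aligned sequence
--             for j in range(len(msa)):
--                 if j != seq_index:
--                     msa[j] = msa[j][:i] + "-" + msa[j][i:]
--     msa[seq_index] = aligned_seq  # Update aligned sequence in MSA
--     return msa
-- ===== SOURCE B (Python) =====
-- def propagate_gaps_to_msa(msa, aligned_seq, seq_index):
--     gaps = [i for i, c in enumerate(aligned_seq) if c == "-"]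
--     for j, row in enumerate(msa):
--         if j != seq_index:
--             parts = []
--             k = 0
--             out_len = 0
--             for i in gaps:
--                 t = min(i - out_len, len(row) - k)
--                 parts.append(row[k:k + t])
--                 parts.append("-")
--                 k += t
--                 out_len += t + 1
--             parts.append(row[k:])
--             msa[j] = "".join(parts)
--     msa[seq_index] = aligned_seq
--     return msa
-- ===== Notes on version B (the rewrite author's own statement) =====
-- stated objective: alternative
-- what changed: Instead of re-slicing every other row once per gap column, B collects the gap positions of the aligned sequence once and rebuilds each row in a single left-to-right interleaving pass (asymptotically fewer string copies when gaps are dense, though not measurably faster on a timing run's gap-sparse inputs).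
import Mathlib
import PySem

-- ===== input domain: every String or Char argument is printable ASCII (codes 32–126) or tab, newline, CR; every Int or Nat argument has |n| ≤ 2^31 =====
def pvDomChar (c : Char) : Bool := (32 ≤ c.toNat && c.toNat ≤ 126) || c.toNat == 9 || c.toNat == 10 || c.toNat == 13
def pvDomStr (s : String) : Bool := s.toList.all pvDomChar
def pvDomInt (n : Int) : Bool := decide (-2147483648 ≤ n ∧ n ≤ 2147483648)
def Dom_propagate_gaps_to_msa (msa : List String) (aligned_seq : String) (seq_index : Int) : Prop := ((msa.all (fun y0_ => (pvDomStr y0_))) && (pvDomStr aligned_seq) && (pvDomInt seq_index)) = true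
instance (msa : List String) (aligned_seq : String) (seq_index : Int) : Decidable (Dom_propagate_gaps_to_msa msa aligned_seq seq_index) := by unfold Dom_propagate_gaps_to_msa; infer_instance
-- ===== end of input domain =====

-- B collects the gap positions of the aligned sequence once and rebuilds each row in a single
-- interleaving pass, instead of re-slicing every other row once per gap column as A does.
-- Equivalence is about the RETURN value; the Python A (and B) also mutate the list `msa` in place.

-- ===== PORT A =====
-- msa[j][:i] + "-" + msa[j][i:]  (i comes from enumerate, so 0 ≤ i)
def pvInsA (i : Int) (s : String) : String :=
  String.ofList (PySem.List.slice s.toList none (some i) ++ '-' :: PySem.List.slice s.toList (some i) none)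

def propagate_gaps_to_msa (msa : List String) (aligned_seq : String) (seq_index : Int) : List String :=
  let m1 := (PySem.List.enumerate aligned_seq.toList).foldl (fun m ic =>
    if ic.2 == '-' then
      (PySem.List.pyRange 0 (m.length : Int) 1).foldl (fun m' j =>
        if j ≠ seq_index then
          PySem.List.pySetD m' j (pvInsA ic.1 (PySem.List.pyGetD m' j ""))
        else m') m
    else m) msa
  -- msa[seq_index] = aligned_seq  (IndexError when out of range — excluded by Pre_)
  PySem.List.pySetD m1 seq_index aligned_seq

-- ===== PORT B =====
-- gap positions of the aligned sequence, collected once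
def pvGaps (cs : List Char) : List Int :=
  ((PySem.List.enumerate cs).filter (fun ic => ic.2 == '-')).map (fun ic => ic.1)

-- the inner `for i in gaps` loop of Source B: consume `rest` with the pointer k (here: take/drop), out_len = olen
def pvMergeRow (gaps : List Int) (rest : List Char) (olen : Int) : List Char :=
  match gaps with
  | [] => rest
  | i :: gs =>
      let t : Int := min (i - olen) (rest.length : Int)   -- t ≥ 0 on every reachable call, so .toNat is exact
      rest.take t.toNat ++ '-' :: pvMergeRow gs (rest.drop t.toNat) (olen + t + 1)

def propagate_gaps_to_msa_alt (msa : List String) (aligned_seq : String) (seq_index : Int) : List String :=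
  let gaps := pvGaps aligned_seq.toList
  let m1 := (PySem.List.enumerate msa).map (fun jr =>
    if jr.1 ≠ seq_index then String.ofList (pvMergeRow gaps jr.2.toList 0) else jr.2)
  -- msa[seq_index] = aligned_seq  (IndexError when out of range — excluded by Pre_)
  PySem.List.pySetD m1 seq_index aligned_seq

-- ===== PRECONDITION & SPEC =====
-- Pre_ excludes exactly the inputs where A raises IndexError: seq_index out of range for msa.
def Pre_propagate_gaps_to_msa (msa : List String) (_aligned_seq : String) (seq_index : Int) : Prop :=
  PySem.Raise.InRange msa.length seq_index
instance (msa : List String) (aligned_seq : String) (seq_index : Int) : Decidable (Pre_propagate_gaps_to_msa msa aligned_seq seq_index) := by unfold Pre_propagate_gaps_to_msa; infer_instance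

def pvWitness_propagate_gaps_to_msa : List String × String × Int := (["AC", "GT"], "A-C", 0)

def Spec_propagate_gaps_to_msa (msa : List String) (aligned_seq : String) (seq_index : Int) (out : List String) : Prop := out = propagate_gaps_to_msa_alt msa aligned_seq seq_index
instance (msa : List String) (aligned_seq : String) (seq_index : Int) (out : List String) : Decidable (Spec_propagate_gaps_to_msa msa aligned_seq seq_index out) := by unfold Spec_propagate_gaps_to_msa; infer_instance

-- ===== CLAIM (what is proved, stated in full; the proofs are below) =====
def Claim_equal_propagate_gaps_to_msa : Prop := ∀ (msa : List String) (aligned_seq : String) (seq_index : Int), Dom_propagate_gaps_to_msa msa aligned_seq seq_index → Pre_propagate_gaps_to_msa msa aligned_seq seq_index → Spec_propagate_gaps_to_msa msa aligned_seq seq_index (propagate_gaps_to_msa msa aligned_seq seq_index)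

-- ===== LEMMAS AND PROOFS =====

-- list-level insertion of '-' at (nonnegative) position i
def pvInsL (i : Int) (cs : List Char) : List Char := cs.take i.toNat ++ '-' :: cs.drop i.toNat

theorem pvInsA_toList (i : Int) (hi : 0 ≤ i) (s : String) :
    (pvInsA i s).toList = pvInsL i s.toList := by
  simp [pvInsA, pvInsL, PySem.List.slice_to _ hi, PySem.List.slice_from _ hi]

-- gap positions of cs, enumerated from s0 (pvGaps cs = pvGapsFrom cs 0)
def pvGapsFrom (cs : List Char) (s0 : Int) : List Int :=
  ((PySem.List.enumerate cs s0).filter (fun ic => ic.2 == '-')).map (fun ic => ic.1)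

theorem pvGapsFrom_cons (c : Char) (cs : List Char) (s0 : Int) :
    pvGapsFrom (c :: cs) s0 =
      if c == '-' then s0 :: pvGapsFrom cs (s0 + 1) else pvGapsFrom cs (s0 + 1) := by
  by_cases h : c = '-' <;> simp [pvGapsFrom, PySem.List.enumerate, h]

theorem pvGapsFrom_lb : ∀ (cs : List Char) (s0 : Int), ∀ i ∈ pvGapsFrom cs s0, s0 ≤ i := by
  intro cs
  induction cs with
  | nil => intro s0 i hi; simp [pvGapsFrom] at hi
  | cons c cs ih =>
      intro s0 i hi
      rw [pvGapsFrom_cons] at hi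
      by_cases h : (c == '-') = true <;> simp [h] at hi
      · rcases hi with hi | hi
        · omega
        · have := ih (s0 + 1) i hi; omega
      · have := ih (s0 + 1) i hi; omega

theorem pvGapsFrom_pairwise : ∀ (cs : List Char) (s0 : Int),
    (pvGapsFrom cs s0).Pairwise (· < ·) := by
  intro cs
  induction cs with
  | nil => intro s0; simp [pvGapsFrom]
  | cons c cs ih =>
      intro s0
      rw [pvGapsFrom_cons]
      by_cases h : (c == '-') = true <;> simp [h]
      · exact ⟨fun i hi => by have := pvGapsFrom_lb cs (s0 + 1) i hi; omega, ih (s0 + 1)⟩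
      · exact ih (s0 + 1)

-- the inner `for j in range(len(msa))` loop: sets at distinct indices = mapIdx on a prefix
theorem pvInner_eq (q iGap : Int) : ∀ (c : Nat) (m : List String), c ≤ m.length →
    (PySem.List.pyRange 0 (c : Int) 1).foldl
      (fun m' j => if j ≠ q then
          PySem.List.pySetD m' j (pvInsA iGap (PySem.List.pyGetD m' j "")) else m') m
    = (m.take c).mapIdx (fun k r => if (k : Int) ≠ q then pvInsA iGap r else r) ++ m.drop c := by
  intro c
  induction c with
  | zero => intro m _; simp [PySem.List.pyRange]
  | succ c ih =>
      intro m hc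
      have hc' : c ≤ m.length := by omega
      have hclt : c < m.length := by omega
      rw [show ((c + 1 : Nat) : Int) = (c : Int) + 1 by push_cast; ring,
          PySem.List.pyRange_one_succ_right (by positivity), List.foldl_append, ih m hc']
      simp only [List.foldl_cons, List.foldl_nil]
      rw [List.drop_eq_getElem_cons hclt,
          show m.take (c + 1) = m.take c ++ [m[c]] by
            rw [List.take_add_one]; simp [List.getElem?_eq_getElem hclt],
          List.mapIdx_append]
      simp only [List.mapIdx_cons, List.mapIdx_nil, List.length_take, Nat.zero_add,
        min_eq_left hc']
      generalize hPg : List.mapIdx (fun k (r : String) => if (k : Int) ≠ q then pvInsA iGap r else r) (m.take c) = P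
      have hP : P.length = c := by rw [← hPg]; simp; omega
      have hget : PySem.List.pyGetD (P ++ m[c] :: m.drop (c + 1)) ((c : Nat) : Int) "" = m[c] := by
        rw [PySem.List.pyGetD_natCast]
        simp [List.getD, List.getElem?_append_right, hP, List.getElem?_eq_getElem hclt]
      by_cases hq : (c : Int) ≠ q
      · rw [if_pos hq, hget, PySem.List.pySetD_natCast, List.set_append, if_neg (by omega),
            hP, Nat.sub_self]
        simp [hq]
        rw [List.drop_eq_getElem_cons hclt, List.set_cons_zero]
      · rw [if_neg hq]
        simp [not_not.mp hq]

theorem pvMapIdx_id {α : Type} (l : List α) : List.mapIdx (fun _ a => a) l = l := by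
  induction l with
  | nil => rfl
  | cons x t ih => rw [List.mapIdx_cons]; exact congrArg (x :: ·) ih

-- the outer loop over the characters of the aligned sequence
theorem pvOuter_eq (q : Int) : ∀ (cs : List Char) (s0 : Int) (m : List String),
    (PySem.List.enumerate cs s0).foldl (fun m ic =>
      if ic.2 == '-' then
        (PySem.List.pyRange 0 (m.length : Int) 1).foldl (fun m' j =>
          if j ≠ q then
            PySem.List.pySetD m' j (pvInsA ic.1 (PySem.List.pyGetD m' j ""))
          else m') m
      else m) m
    = m.mapIdx (fun k r => if (k : Int) ≠ q then
        (pvGapsFrom cs s0).foldl (fun r i => pvInsA i r) r else r) := by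
  intro cs
  induction cs with
  | nil =>
      intro s0 m
      show m = List.mapIdx (fun k r => if (k : Int) ≠ q then
        (pvGapsFrom [] s0).foldl (fun r i => pvInsA i r) r else r) m
      have h1 : (fun (k : Nat) (r : String) => if (k : Int) ≠ q then
          (pvGapsFrom [] s0).foldl (fun r i => pvInsA i r) r else r) = fun _ r => r := by
        funext k r; by_cases hk : (k : Int) ≠ q <;> simp [hk, pvGapsFrom, PySem.List.enumerate]
      rw [h1, pvMapIdx_id]
  | cons c cs ih =>
      intro s0 m
      rw [show PySem.List.enumerate (c :: cs) s0 = (s0, c) :: PySem.List.enumerate cs (s0 + 1) from rfl,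
          List.foldl_cons, pvGapsFrom_cons]
      by_cases hg : (c == '-') = true
      · rw [if_pos hg, if_pos hg]
        rw [pvInner_eq q s0 m.length m (le_refl _)]
        simp only [List.take_length, List.drop_length, List.append_nil]
        rw [ih (s0 + 1)]
        rw [List.mapIdx_mapIdx]
        congr 1
        funext k r
        by_cases hk : (k : Int) ≠ q <;> simp [hk, Function.comp]
      · rw [if_neg hg, if_neg hg]
        exact ih (s0 + 1) m

-- string-level gap-insertion fold = list-level fold
theorem pvFoldA_toList : ∀ (gaps : List Int) (r : String), (∀ i ∈ gaps, 0 ≤ i) →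
    (gaps.foldl (fun r i => pvInsA i r) r).toList
    = gaps.foldl (fun cs i => pvInsL i cs) r.toList := by
  intro gaps
  induction gaps with
  | nil => intro r _; rfl
  | cons i gs ih =>
      intro r h
      rw [List.foldl_cons, List.foldl_cons, ih _ (fun j hj => h j (by simp [hj])),
          pvInsA_toList i (h i (by simp)) r]

-- one gap insertion into done ++ rest, where all gaps lie at or beyond done
theorem pvMerge_eq : ∀ (gaps : List Int) (done rest : List Char),
    gaps.Pairwise (· < ·) → (∀ i ∈ gaps, (done.length : Int) ≤ i) →
    gaps.foldl (fun cs i => pvInsL i cs) (done ++ rest)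
    = done ++ pvMergeRow gaps rest (done.length : Int) := by
  intro gaps
  induction gaps with
  | nil => intro done rest _ _; simp [pvMergeRow]
  | cons i gs ih =>
      intro done rest hpw hlb
      rcases List.pairwise_cons.mp hpw with ⟨hlt, hpw'⟩
      have hdl : (done.length : Int) ≤ i := hlb i (by simp)
      set t : Int := min (i - (done.length : Int)) (rest.length : Int) with htdef
      have ht0 : 0 ≤ t := by omega
      have htle : t ≤ i - (done.length : Int) := by omega
      have hins : pvInsL i (done ++ rest)
          = (done ++ rest.take t.toNat ++ ['-']) ++ rest.drop t.toNat := by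
        unfold pvInsL
        rw [List.take_append, List.drop_append]
        rw [List.take_of_length_le (by omega), List.drop_of_length_le (by omega)]
        have h1 : rest.take (i.toNat - done.length) = rest.take t.toNat := by
          rcases le_or_gt (i - (done.length : Int)) (rest.length : Int) with h | h
          · congr 1; omega
          · rw [List.take_of_length_le (by omega), List.take_of_length_le (by omega)]
        have h2 : rest.drop (i.toNat - done.length) = rest.drop t.toNat := by
          rcases le_or_gt (i - (done.length : Int)) (rest.length : Int) with h | h
          · congr 1; omega
          · rw [List.drop_of_length_le (by omega), List.drop_of_length_le (by omega)]
        rw [h1, h2]; simp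
      rw [List.foldl_cons, hins,
          ih (done ++ rest.take t.toNat ++ ['-']) (rest.drop t.toNat) hpw'
            (by intro j hj; have := hlt j hj
                have hlen : (rest.take t.toNat).length = t.toNat := by
                  rw [List.length_take]; omega
                simp [hlen]; omega)]
      have hlen' : ((done ++ rest.take t.toNat ++ ['-']).length : Int)
          = (done.length : Int) + t + 1 := by
        have hlen : (rest.take t.toNat).length = t.toNat := by
          rw [List.length_take]; omega
        simp [hlen]; omega
      rw [hlen']
      show (done ++ rest.take t.toNat ++ ['-']) ++ pvMergeRow gs (rest.drop t.toNat) ((done.length : Int) + t + 1)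
          = done ++ pvMergeRow (i :: gs) rest (done.length : Int)
      conv_rhs => rw [pvMergeRow]
      simp [List.append_assoc, htdef]

-- enumerate-then-map is mapIdx
theorem pvEnumMap_eq {β : Type} : ∀ (m : List String) (s0 : Int) (h : Int → String → β),
    (PySem.List.enumerate m s0).map (fun jr => h jr.1 jr.2)
    = m.mapIdx (fun k r => h (s0 + (k : Int)) r) := by
  intro m
  induction m with
  | nil => intro s0 h; rfl
  | cons x m ih =>
      intro s0 h
      rw [show PySem.List.enumerate (x :: m) s0 = (s0, x) :: PySem.List.enumerate m (s0 + 1) from rfl,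
          List.map_cons, ih (s0 + 1), List.mapIdx_cons]
      congr 1
      · simp
      · congr 1; funext k r; congr 1; push_cast; ring

-- ===== VERDICT (by name: the statement is the Claim_ definition above) =====
theorem propagate_gaps_to_msa_spec : Claim_equal_propagate_gaps_to_msa := by
  intro msa al q _ _
  show propagate_gaps_to_msa msa al q = propagate_gaps_to_msa_alt msa al q
  unfold propagate_gaps_to_msa propagate_gaps_to_msa_alt
  rw [pvOuter_eq q al.toList 0 msa]
  dsimp only
  rw [pvEnumMap_eq msa 0 (fun j r => if j ≠ q then
        String.ofList (pvMergeRow (pvGaps al.toList) r.toList 0) else r)]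
  have hgaps0 : ∀ i ∈ pvGapsFrom al.toList 0, (0 : Int) ≤ i := pvGapsFrom_lb al.toList 0
  have hFG : ∀ r : String,
      (pvGapsFrom al.toList 0).foldl (fun r i => pvInsA i r) r
      = String.ofList (pvMergeRow (pvGaps al.toList) r.toList 0) := by
    intro r
    have h := pvFoldA_toList (pvGapsFrom al.toList 0) r hgaps0
    have h2' := pvMerge_eq (pvGapsFrom al.toList 0) [] r.toList
      (pvGapsFrom_pairwise al.toList 0) (by intro i hi; simpa using hgaps0 i hi)
    simp only [List.nil_append] at h2'
    calc (pvGapsFrom al.toList 0).foldl (fun r i => pvInsA i r) r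
        = String.ofList ((pvGapsFrom al.toList 0).foldl (fun r i => pvInsA i r) r).toList := by
          rw [String.ofList_toList]
      _ = String.ofList (pvMergeRow (pvGapsFrom al.toList 0) r.toList 0) := by
          rw [h, h2']; norm_num
  have hfun : (fun (k : Nat) (r : String) => if (0 : Int) + (k : Int) ≠ q then
        String.ofList (pvMergeRow (pvGaps al.toList) r.toList 0) else r)
      = fun (k : Nat) (r : String) => if (k : Int) ≠ q then
        (pvGapsFrom al.toList 0).foldl (fun r i => pvInsA i r) r else r := by
    funext k r
    rw [zero_add, hFG]
  rw [hfun]
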